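-- pv_equiv track=rewrite | github.com/EvilJoker/swallowloop | src/swallowloop/application/service/execution_service.py | _get_pr_type
-- ===== SOURCE A (Python) =====
-- def _get_pr_type(labels: list[str]) -> str:
--     """根据标签获取 PR 类型"""
--     label_set = {label.lower() for label in labels}
--
--     if label_set & {"bug", "fix", "defect"}:
--         return "fix"
--     if label_set & {"documentation", "docs", "document"}:
--         return "docs"
--     if label_set & {"chore", "refactor", "maintenance"}:
--         return "chore"
--     if label_set & {"test", "testing"}:
--         return "test"
--
--     return "feat"
-- ===== SOURCE B (Python) =====
-- _RANK = {
--     "bug": (0, "fix"), "fix": (0, "fix"), "defect": (0, "fix"),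
--     "documentation": (1, "docs"), "docs": (1, "docs"), "document": (1, "docs"),
--     "chore": (2, "chore"), "refactor": (2, "chore"), "maintenance": (2, "chore"),
--     "test": (3, "test"), "testing": (3, "test"),
-- }
--
--
-- def _get_pr_type(labels: list[str]) -> str:
--     """One min-tracking pass over the labels instead of four set-intersection branches."""
--     best = (4, "feat")
--     for label in labels:
--         entry = _RANK.get(label.lower())
--         if entry is not None and entry[0] < best[0]:
--             best = entry
--     return best[1]
-- ===== Notes on version B (the rewrite author's own statement) =====
-- stated objective: alternative
-- what changed: Replaces the set-comprehension plus four ordered set-intersection branches with a static label->(priority, category) dict and a single min-tracking fold over the labels.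
import Mathlib
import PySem

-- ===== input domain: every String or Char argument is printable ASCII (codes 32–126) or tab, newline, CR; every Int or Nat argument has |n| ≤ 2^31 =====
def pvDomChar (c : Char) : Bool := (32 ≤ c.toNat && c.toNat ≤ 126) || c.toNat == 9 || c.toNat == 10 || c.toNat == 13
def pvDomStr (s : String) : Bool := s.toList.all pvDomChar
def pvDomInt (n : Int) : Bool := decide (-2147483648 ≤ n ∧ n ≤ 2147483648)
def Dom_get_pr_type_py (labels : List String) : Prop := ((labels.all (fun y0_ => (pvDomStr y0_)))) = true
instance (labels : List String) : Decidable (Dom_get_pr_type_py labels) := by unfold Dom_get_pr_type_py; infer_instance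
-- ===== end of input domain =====

-- B replaces the four set-intersection branches with a static label→(priority, category)
-- table and one min-tracking fold over the labels (objective: alternative decomposition).

-- ===== PORT A =====
def get_pr_type_py (labels : List String) : String :=
  let label_set : PySem.Set String := PySem.Set.ofList (labels.map PySem.Str.lower)
  if PySem.Set.inter label_set ["bug", "fix", "defect"] ≠ [] then "fix"
  else if PySem.Set.inter label_set ["documentation", "docs", "document"] ≠ [] then "docs"
  else if PySem.Set.inter label_set ["chore", "refactor", "maintenance"] ≠ [] then "chore"
  else if PySem.Set.inter label_set ["test", "testing"] ≠ [] then "test"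
  else "feat"

-- ===== PORT B =====
def prTable : PySem.Dict String (Nat × String) := PySem.Dict.mk
  [("bug", (0, "fix")), ("fix", (0, "fix")), ("defect", (0, "fix")),
   ("documentation", (1, "docs")), ("docs", (1, "docs")), ("document", (1, "docs")),
   ("chore", (2, "chore")), ("refactor", (2, "chore")), ("maintenance", (2, "chore")),
   ("test", (3, "test")), ("testing", (3, "test"))]

def get_pr_type_py_alt (labels : List String) : String :=
  (labels.foldl
    (fun (best : Nat × String) label =>
      match PySem.Dict.get? prTable (PySem.Str.lower label) with
      | some entry => if entry.1 < best.1 then entry else best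
      | none => best)
    (4, "feat")).2

-- ===== PRECONDITION & SPEC =====
def Spec_get_pr_type_py (labels : List String) (out : String) : Prop := out = get_pr_type_py_alt labels
instance (labels : List String) (out : String) : Decidable (Spec_get_pr_type_py labels out) := by unfold Spec_get_pr_type_py; infer_instance

-- ===== CLAIM (what is proved, stated in full; the proofs are below) =====
def Claim_equal_get_pr_type_py : Prop := ∀ (labels : List String), Dom_get_pr_type_py labels → Spec_get_pr_type_py labels (get_pr_type_py labels)

-- ===== LEMMAS AND PROOFS =====

/-- the five accumulator values B's loop can hold, indexed by rank -/
def rankPair (r : Nat) : Nat × String :=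
  match r with
  | 0 => (0, "fix")
  | 1 => (1, "docs")
  | 2 => (2, "chore")
  | 3 => (3, "test")
  | _ => (4, "feat")

/-- rank of a (lowercased) label: table rank, 4 if unrecognized -/
def rk (s : String) : Nat :=
  match PySem.Dict.get? prTable s with
  | some entry => entry.1
  | none => 4

theorem rankPair_fst (r : Nat) (hr : r ≤ 4) : (rankPair r).1 = r := by
  interval_cases r <;> rfl

set_option maxHeartbeats 1000000 in
theorem get?_spec (s : String) : PySem.Dict.get? prTable s =
    (if s = "bug" ∨ s = "fix" ∨ s = "defect" then some (0, "fix")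
     else if s = "documentation" ∨ s = "docs" ∨ s = "document" then some (1, "docs")
     else if s = "chore" ∨ s = "refactor" ∨ s = "maintenance" then some (2, "chore")
     else if s = "test" ∨ s = "testing" then some (3, "test")
     else none) := by
  simp only [prTable, PySem.Dict.get?_mk_cons, beq_iff_eq]
  split_ifs with a b c d e f g h i j k <;> subst_vars <;> simp_all [PySem.Dict.get?, eq_comm]

theorem rk_spec (s : String) : rk s =
    (if s = "bug" ∨ s = "fix" ∨ s = "defect" then 0
     else if s = "documentation" ∨ s = "docs" ∨ s = "document" then 1
     else if s = "chore" ∨ s = "refactor" ∨ s = "maintenance" then 2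
     else if s = "test" ∨ s = "testing" then 3
     else 4) := by
  unfold rk
  rw [get?_spec]
  split_ifs <;> rfl

theorem rk_le (s : String) : rk s ≤ 4 := by
  rw [rk_spec]; split_ifs <;> omega

theorem get?_eq_rankPair (s : String) :
    PySem.Dict.get? prTable s = if rk s = 4 then none else some (rankPair (rk s)) := by
  rw [get?_spec, rk_spec]
  split_ifs <;> simp_all [rankPair]

/-- the minimum rank occurring among the lowered labels -/
def bestRank (l : List String) : Nat :=
  l.foldr (fun x m => min (rk (PySem.Str.lower x)) m) 4

theorem bestRank_le (l : List String) : bestRank l ≤ 4 := by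
  induction l with
  | nil => simp [bestRank]
  | cons x l ih => simpa [bestRank] using Or.inr ih

theorem step_eq (r : Nat) (hr : r ≤ 4) (label : String) :
    (match PySem.Dict.get? prTable (PySem.Str.lower label) with
      | some entry => if entry.1 < (rankPair r).1 then entry else rankPair r
      | none => rankPair r)
      = rankPair (min r (rk (PySem.Str.lower label))) := by
  rw [get?_eq_rankPair (PySem.Str.lower label)]
  have hle := rk_le (PySem.Str.lower label)
  set t := rk (PySem.Str.lower label) with ht
  by_cases h4 : t = 4
  · rw [if_pos h4]
    have : min r t = r := by omega
    rw [this]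
  · rw [if_neg h4]
    simp only []
    rw [rankPair_fst r hr, rankPair_fst t (by omega)]
    by_cases hlt : t < r
    · rw [if_pos hlt]; congr 1; omega
    · rw [if_neg hlt]; congr 1; omega

theorem loop_eq (l : List String) : ∀ (r : Nat), r ≤ 4 →
    l.foldl
      (fun (best : Nat × String) label =>
        match PySem.Dict.get? prTable (PySem.Str.lower label) with
        | some entry => if entry.1 < best.1 then entry else best
        | none => best)
      (rankPair r) = rankPair (min r (bestRank l)) := by
  induction l with
  | nil => intro r hr; simp [bestRank]; congr 1; omega
  | cons x l ih =>
    intro r hr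
    rw [List.foldl_cons]
    show List.foldl _ (match PySem.Dict.get? prTable (PySem.Str.lower x) with
      | some entry => if entry.1 < (rankPair r).1 then entry else rankPair r
      | none => rankPair r) l = _
    rw [step_eq r hr x, ih _ (by omega)]
    congr 1
    simp only [bestRank, List.foldr_cons]
    omega

theorem alt_eq (l : List String) : get_pr_type_py_alt l = (rankPair (bestRank l)).2 := by
  have h4 : rankPair 4 = (4, "feat") := rfl
  unfold get_pr_type_py_alt
  rw [← h4, loop_eq l 4 le_rfl]
  congr 2
  have := bestRank_le l
  omega

theorem bestRank_cond (l : List String) (k : Nat) (hk : k ≤ 3) :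
    bestRank l ≤ k ↔ ∃ x ∈ l, rk (PySem.Str.lower x) ≤ k := by
  induction l with
  | nil => simp [bestRank]; omega
  | cons x l ih =>
    simp only [bestRank, List.foldr_cons, List.mem_cons]
    constructor
    · intro h
      rcases min_le_iff.mp (by simpa [bestRank] using h) with h1 | h2
      · exact ⟨x, Or.inl rfl, h1⟩
      · obtain ⟨y, hy, hr⟩ := ih.mp h2
        exact ⟨y, Or.inr hy, hr⟩
    · rintro ⟨y, (rfl | hy), hr⟩
      · exact le_trans (min_le_left _ _) hr
      · exact le_trans (min_le_right _ _) (ih.mpr ⟨y, hy, hr⟩)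

theorem inter_ne_iff (L : List String) (c : List String) :
    PySem.Set.inter (PySem.Set.ofList L) c ≠ [] ↔ ∃ x ∈ L, x ∈ c := by
  constructor
  · intro h
    obtain ⟨x, hx⟩ := List.exists_mem_of_ne_nil _ h
    have := (PySem.Set.mem_inter _ _ _).mp hx
    exact ⟨x, (PySem.Set.mem_ofList _ _).mp this.1, this.2⟩
  · rintro ⟨x, hxL, hxc⟩ hnil
    have : x ∈ PySem.Set.inter (PySem.Set.ofList L) c :=
      (PySem.Set.mem_inter _ _ _).mpr ⟨(PySem.Set.mem_ofList _ _).mpr hxL, hxc⟩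
    simp [hnil] at this

theorem rk_eq_iff (s : String) (k : Nat) (hk : k ≤ 3) :
    rk s = k ↔ s ∈ (match k with
      | 0 => ["bug", "fix", "defect"]
      | 1 => ["documentation", "docs", "document"]
      | 2 => ["chore", "refactor", "maintenance"]
      | _ => ["test", "testing"]) := by
  rw [rk_spec]
  interval_cases k <;> simp only [List.mem_cons, List.not_mem_nil, or_false] <;>
    split_ifs with a b c d <;>
    first
      | (simp_all; done)
      | (rcases a with rfl | rfl | rfl <;> simp_all)
      | (rcases b with rfl | rfl | rfl <;> simp_all)
      | (rcases c with rfl | rfl | rfl <;> simp_all)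

-- ===== VERDICT (by name: the statement is the Claim_ definition above) =====
theorem get_pr_type_py_spec : Claim_equal_get_pr_type_py := by
  intro labels _
  unfold Spec_get_pr_type_py
  rw [alt_eq]
  unfold get_pr_type_py
  dsimp only
  have condk : ∀ (k : Nat), k ≤ 3 →
      ((PySem.Set.inter (PySem.Set.ofList (labels.map PySem.Str.lower)) (match k with
        | 0 => ["bug", "fix", "defect"]
        | 1 => ["documentation", "docs", "document"]
        | 2 => ["chore", "refactor", "maintenance"]
        | _ => ["test", "testing"]) ≠ []) ↔
        ∃ y ∈ labels, rk (PySem.Str.lower y) = k) := by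
    intro k hk
    rw [inter_ne_iff]
    constructor
    · rintro ⟨x, hx, hc⟩
      obtain ⟨y, hy, rfl⟩ := List.mem_map.mp hx
      exact ⟨y, hy, (rk_eq_iff _ k hk).mpr hc⟩
    · rintro ⟨y, hy, hc⟩
      exact ⟨_, List.mem_map.mpr ⟨y, hy, rfl⟩, (rk_eq_iff _ k hk).mp hc⟩
  split_ifs with h0 h1 h2 h3
  · obtain ⟨y, hy, h⟩ := (condk 0 (by omega)).mp h0
    have : bestRank labels ≤ 0 := (bestRank_cond labels 0 (by omega)).mpr ⟨y, hy, by omega⟩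
    have hb : bestRank labels = 0 := by omega
    rw [hb]; rfl
  · obtain ⟨y, hy, h⟩ := (condk 1 (by omega)).mp h1
    have hle : bestRank labels ≤ 1 := (bestRank_cond labels 1 (by omega)).mpr ⟨y, hy, by omega⟩
    have hne : bestRank labels ≠ 0 := by
      intro hz
      obtain ⟨z, hz1, hz2⟩ := (bestRank_cond labels 0 (by omega)).mp (by omega)
      exact h0 ((condk 0 (by omega)).mpr ⟨z, hz1, by omega⟩)
    have hb : bestRank labels = 1 := by omega
    rw [hb]; rfl
  · obtain ⟨y, hy, h⟩ := (condk 2 (by omega)).mp h2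
    have hle : bestRank labels ≤ 2 := (bestRank_cond labels 2 (by omega)).mpr ⟨y, hy, by omega⟩
    have hne : ¬ bestRank labels ≤ 1 := by
      intro hz
      obtain ⟨z, hz1, hz2⟩ := (bestRank_cond labels 1 (by omega)).mp hz
      have : rk (PySem.Str.lower z) = 0 ∨ rk (PySem.Str.lower z) = 1 := by omega
      rcases this with h' | h'
      · exact h0 ((condk 0 (by omega)).mpr ⟨z, hz1, h'⟩)
      · exact h1 ((condk 1 (by omega)).mpr ⟨z, hz1, h'⟩)
    have hb : bestRank labels = 2 := by omega
    rw [hb]; rfl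
  · obtain ⟨y, hy, h⟩ := (condk 3 (by omega)).mp h3
    have hle : bestRank labels ≤ 3 := (bestRank_cond labels 3 (by omega)).mpr ⟨y, hy, by omega⟩
    have hne : ¬ bestRank labels ≤ 2 := by
      intro hz
      obtain ⟨z, hz1, hz2⟩ := (bestRank_cond labels 2 (by omega)).mp hz
      have : rk (PySem.Str.lower z) = 0 ∨ rk (PySem.Str.lower z) = 1 ∨
          rk (PySem.Str.lower z) = 2 := by omega
      rcases this with h' | h' | h'
      · exact h0 ((condk 0 (by omega)).mpr ⟨z, hz1, h'⟩)
      · exact h1 ((condk 1 (by omega)).mpr ⟨z, hz1, h'⟩)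
      · exact h2 ((condk 2 (by omega)).mpr ⟨z, hz1, h'⟩)
    have hb : bestRank labels = 3 := by omega
    rw [hb]; rfl
  · have hne : ¬ bestRank labels ≤ 3 := by
      intro hz
      obtain ⟨z, hz1, hz2⟩ := (bestRank_cond labels 3 (by omega)).mp hz
      have : rk (PySem.Str.lower z) = 0 ∨ rk (PySem.Str.lower z) = 1 ∨
          rk (PySem.Str.lower z) = 2 ∨ rk (PySem.Str.lower z) = 3 := by omega
      rcases this with h' | h' | h' | h'
      · exact h0 ((condk 0 (by omega)).mpr ⟨z, hz1, h'⟩)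
      · exact h1 ((condk 1 (by omega)).mpr ⟨z, hz1, h'⟩)
      · exact h2 ((condk 2 (by omega)).mpr ⟨z, hz1, h'⟩)
      · exact h3 ((condk 3 (by omega)).mpr ⟨z, hz1, h'⟩)
    have hb : bestRank labels = 4 := by
      have := bestRank_le labels; omega
    rw [hb]; rfl
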